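-- pv_equiv track=rewrite | github.com/BenjiAvH/BA26_Benjamin_Ersatzplanung | etappe01_simulation/simulator/generator.py | build_weeks
-- ===== SOURCE A (Python) =====
-- def build_weeks(T: int) -> list[list[int]]:
--     weeks: list[list[int]] = []
--     w = 0
--     while w * 7 < T:
--         start = w * 7 + 1
--         end = min(T, (w + 1) * 7)
--         weeks.append(list(range(start, end + 1)))
--         w += 1
--     return weeks
-- ===== SOURCE B (Python) =====
-- def build_weeks(T: int) -> list[list[int]]:
--     buckets: dict[int, list[int]] = {}
--     for d in range(1, T + 1):
--         buckets.setdefault((d - 1) // 7, []).append(d)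
--     return list(buckets.values())
-- ===== Notes on version B (the rewrite author's own statement) =====
-- stated objective: alternative
-- what changed: B iterates over the individual days 1..T and groups each day into a dict bucket keyed by its week index (d-1)//7, returning the bucket values, instead of A's while-loop over week indices that constructs each week as an arithmetic range with computed start/end bounds.
import Mathlib
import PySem

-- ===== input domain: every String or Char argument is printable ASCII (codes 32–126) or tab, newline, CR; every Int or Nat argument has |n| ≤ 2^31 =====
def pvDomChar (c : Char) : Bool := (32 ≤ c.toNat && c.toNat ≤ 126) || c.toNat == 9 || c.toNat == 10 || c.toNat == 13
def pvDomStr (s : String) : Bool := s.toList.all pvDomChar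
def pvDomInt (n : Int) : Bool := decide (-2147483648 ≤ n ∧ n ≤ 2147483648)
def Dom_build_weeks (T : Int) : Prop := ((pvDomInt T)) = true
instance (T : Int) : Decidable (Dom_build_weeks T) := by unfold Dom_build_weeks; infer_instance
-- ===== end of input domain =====

-- B groups the days 1..T into dict buckets keyed by (d-1)//7 and returns the bucket
-- values, instead of A's per-week while loop building each week as an arithmetic range
-- (alternative algorithm, same cost; return value only — neither mutates its argument).


-- ===== PORT A =====
-- the while loop of A: state = (w, weeks accumulator)
def build_weeks_go (T w : Int) (weeks : List (List Int)) : List (List Int) :=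
  if _h : w * 7 < T then
    build_weeks_go T (w + 1)
      (weeks ++ [PySem.List.pyRange (w * 7 + 1) (min T ((w + 1) * 7) + 1) 1])
  else weeks
termination_by (T - w * 7).toNat
decreasing_by omega

def build_weeks (T : Int) : List (List Int) := build_weeks_go T 0 []

-- ===== PORT B =====
-- 'buckets.setdefault((d - 1) // 7, []).append(d)' is Dict.modify key [] (· ++ [d])
def build_weeks_alt (T : Int) : List (List Int) :=
  let buckets :=
    (PySem.List.pyRange 1 (T + 1) 1).foldl
      (fun dc d => dc.modify (PySem.Int.floordiv (d - 1) 7) [] (· ++ [d]))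
      PySem.Dict.empty
  buckets.values

-- ===== PRECONDITION & SPEC =====
def Spec_build_weeks (T : Int) (out : List (List Int)) : Prop := out = build_weeks_alt T
instance (T : Int) (out : List (List Int)) : Decidable (Spec_build_weeks T out) := by unfold Spec_build_weeks; infer_instance

-- ===== CLAIM (what is proved, stated in full; the proofs are below) =====
def Claim_equal_build_weeks : Prop := ∀ (T : Int), Dom_build_weeks T → Spec_build_weeks T (build_weeks T)

-- ===== LEMMAS AND PROOFS =====

-- number of weeks, as an Int: ceil(T/7) for positive T, ≤ 0 otherwise
def pvWeeks (T : Int) : Int := PySem.Int.floordiv (T + 6) 7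

-- A's week w
def pvWeek (T w : Int) : List Int :=
  PySem.List.pyRange (w * 7 + 1) (min T ((w + 1) * 7) + 1) 1

-- A's loop appends exactly the weeks w, w+1, …, pvWeeks T - 1
theorem build_weeks_go_eq (T : Int) (n : Nat) : ∀ (w : Int) (weeks : List (List Int)),
    0 ≤ w → (T - w * 7).toNat ≤ n →
    build_weeks_go T w weeks =
      weeks ++ (PySem.List.pyRange w (pvWeeks T) 1).map (pvWeek T) := by
  induction n with
  | zero =>
    intro w weeks hw hn
    rw [build_weeks_go, dif_neg (by omega)]
    rw [PySem.List.pyRange_one_eq_nil (by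
      unfold pvWeeks
      rw [PySem.Int.floordiv_eq_ediv_of_pos (by norm_num)]
      omega)]
    simp
  | succ m ih =>
    intro w weeks hw hn
    by_cases h : w * 7 < T
    · have hlt : w < pvWeeks T := by
        unfold pvWeeks
        rw [PySem.Int.floordiv_eq_ediv_of_pos (by norm_num)]
        omega
      rw [build_weeks_go, dif_pos h, ih (w + 1) _ (by omega) (by omega),
          PySem.List.pyRange_one_cons hlt, List.map_cons]
      simp [pvWeek]
    · rw [build_weeks_go, dif_neg h]
      rw [PySem.List.pyRange_one_eq_nil (by
        unfold pvWeeks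
        rw [PySem.Int.floordiv_eq_ediv_of_pos (by norm_num)]
        omega)]
      simp

theorem build_weeks_closed (T : Int) :
    build_weeks T = (PySem.List.pyRange 0 (pvWeeks T) 1).map (pvWeek T) := by
  rw [build_weeks, build_weeks_go_eq T (T - 0 * 7).toNat 0 [] le_rfl le_rfl, List.nil_append]

-- the days of 1..b-1 falling in week w are exactly A's week-w range (general bounds)
theorem filter_week (w : Int) (n : Nat) : ∀ (a b : Int), b = a + (n : Int) →
    (PySem.List.pyRange a b 1).filter (fun d => PySem.Int.floordiv (d - 1) 7 == w) =
      PySem.List.pyRange (max a (w * 7 + 1)) (min b (w * 7 + 8)) 1 := by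
  induction n with
  | zero =>
    intro a b hb
    rw [PySem.List.pyRange_one_eq_nil (by omega),
        PySem.List.pyRange_one_eq_nil (by omega)]
    simp
  | succ m ih =>
    intro a b hb
    rw [PySem.List.pyRange_one_cons (by omega : a < b), List.filter_cons]
    have hkey : (PySem.Int.floordiv (a - 1) 7 == w) =
        decide (w * 7 + 1 ≤ a ∧ a ≤ w * 7 + 7) := by
      rw [PySem.Int.floordiv_eq_ediv_of_pos (by norm_num)]
      rcases Decidable.em (w * 7 + 1 ≤ a ∧ a ≤ w * 7 + 7) with hc | hc
      · have h1 : (a - 1) / 7 = w := by omega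
        rw [decide_eq_true hc]
        simp [h1]
      · have h1 : (a - 1) / 7 ≠ w := by omega
        rw [decide_eq_false hc]
        simp [h1]
    rw [hkey, ih (a + 1) b (by omega)]
    rcases Decidable.em (w * 7 + 1 ≤ a ∧ a ≤ w * 7 + 7) with hc | hc
    · rw [decide_eq_true hc, if_pos rfl,
          show max a (w * 7 + 1) = a by omega, show max (a + 1) (w * 7 + 1) = a + 1 by omega,
          PySem.List.pyRange_one_cons (by omega : a < min b (w * 7 + 8))]
    · rw [decide_eq_false hc, if_neg (by simp)]
      rcases Decidable.em (a < w * 7 + 1) with hlo | hhi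
      · rw [show max (a + 1) (w * 7 + 1) = max a (w * 7 + 1) by omega]
      · rw [PySem.List.pyRange_one_eq_nil (by omega),
            PySem.List.pyRange_one_eq_nil (by omega)]

-- the distinct week keys of days 1..n, in first-occurrence order, are 0,1,…,pvWeeks n - 1
theorem keys_of_days (n : Nat) :
    PySem.Set.ofList ((PySem.List.pyRange 1 ((n : Int) + 1) 1).map
        (fun d => PySem.Int.floordiv (d - 1) 7)) =
      PySem.List.pyRange 0 (pvWeeks (n : Int)) 1 := by
  induction n with
  | zero =>
    rw [PySem.List.pyRange_one_eq_nil (by norm_num), List.map_nil, PySem.Set.ofList_nil,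
        PySem.List.pyRange_one_eq_nil (by unfold pvWeeks; decide)]
  | succ m ih =>
    have hstep : ((m : Int) + 1) + 1 = ((m : Int) + 1) + 1 := rfl
    rw [show ((m + 1 : Nat) : Int) + 1 = ((m : Int) + 1) + 1 by push_cast; ring,
        PySem.List.pyRange_one_succ_right (by omega : (1 : Int) ≤ (m : Int) + 1),
        List.map_append, List.map_cons, List.map_nil, PySem.Set.ofList_append_singleton, ih]
    have hkey : PySem.Int.floordiv ((m : Int) + 1 - 1) 7 = (m : Int) / 7 := by
      rw [PySem.Int.floordiv_eq_ediv_of_pos (by norm_num)]; norm_num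
    have hW : pvWeeks (m : Int) = PySem.Int.floordiv ((m : Int) + 6) 7 := rfl
    rcases Decidable.em ((m : Int) % 7 = 0) with hz | hz
    · -- new week starts: key m/7 = pvWeeks m, appended at the end
      have hnot : (m : Int) / 7 ∉ PySem.List.pyRange 0 (pvWeeks (m : Int)) 1 := by
        rw [PySem.List.mem_pyRange_one]
        unfold pvWeeks
        rw [PySem.Int.floordiv_eq_ediv_of_pos (by norm_num)]
        omega
      rw [hkey, PySem.Set.add_of_not_mem hnot,
          show pvWeeks ((m + 1 : Nat) : Int) = (m : Int) / 7 + 1 by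
            unfold pvWeeks
            rw [PySem.Int.floordiv_eq_ediv_of_pos (by norm_num)]
            push_cast; omega,
          PySem.List.pyRange_one_succ_right (by omega : (0 : Int) ≤ (m : Int) / 7),
          show pvWeeks (m : Int) = (m : Int) / 7 by
            unfold pvWeeks
            rw [PySem.Int.floordiv_eq_ediv_of_pos (by norm_num)]
            omega]
    · -- same week continues: key already present, set unchanged
      have hmem : (m : Int) / 7 ∈ PySem.List.pyRange 0 (pvWeeks (m : Int)) 1 := by
        rw [PySem.List.mem_pyRange_one]
        unfold pvWeeks
        rw [PySem.Int.floordiv_eq_ediv_of_pos (by norm_num)]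
        omega
      rw [hkey, PySem.Set.add_of_mem hmem,
          show pvWeeks ((m + 1 : Nat) : Int) = pvWeeks (m : Int) by
            unfold pvWeeks
            rw [PySem.Int.floordiv_eq_ediv_of_pos (by norm_num),
                PySem.Int.floordiv_eq_ediv_of_pos (by norm_num)]
            push_cast; omega]

-- ===== VERDICT (by name: the statement is the Claim_ definition above) =====
-- B's bucket dict, fully characterised: its values are exactly A's weeks
theorem build_weeks_alt_closed (T : Int) :
    build_weeks_alt T = (PySem.List.pyRange 0 (pvWeeks T) 1).map (pvWeek T) := by
  unfold build_weeks_alt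
  rcases Decidable.em (T < 0) with hneg | hpos
  · rw [PySem.List.pyRange_one_eq_nil (by omega : T + 1 ≤ 1), List.foldl_nil,
        PySem.List.pyRange_one_eq_nil (by
          unfold pvWeeks
          rw [PySem.Int.floordiv_eq_ediv_of_pos (by norm_num)]
          omega)]
    rfl
  · have hT : T = (T.toNat : Int) := by omega
    have hkeys :
        ((PySem.List.pyRange 1 (T + 1) 1).foldl
            (fun dc d => dc.modify (PySem.Int.floordiv (d - 1) 7) [] (· ++ [d]))
            PySem.Dict.empty).keys = PySem.List.pyRange 0 (pvWeeks T) 1 := by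
      rw [PySem.Dict.keys_foldl_modify_key, PySem.Dict.keys_empty,
          PySem.Set.update_nil_left, hT, keys_of_days]
    have hnd :
        ((PySem.List.pyRange 1 (T + 1) 1).foldl
            (fun dc d => dc.modify (PySem.Int.floordiv (d - 1) 7) [] (· ++ [d]))
            PySem.Dict.empty).keys.Nodup := by
      rw [hkeys]; exact PySem.List.nodup_pyRange_one _ _
    rw [PySem.Dict.values_eq_map_keys _ hnd [], hkeys]
    refine List.map_congr_left (fun w hw => ?_)
    rw [PySem.List.mem_pyRange_one] at hw
    have hfold :
        (PySem.List.pyRange 1 (T + 1) 1).foldl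
            (fun dc d => dc.modify (PySem.Int.floordiv (d - 1) 7) [] (· ++ [d]))
            PySem.Dict.empty =
          ((PySem.List.pyRange 1 (T + 1) 1).map
              (fun d => (PySem.Int.floordiv (d - 1) 7, d))).foldl
            (fun (dc : PySem.Dict Int (List Int)) (p : Int × Int) =>
              dc.modify p.1 [] (· ++ [p.2]))
            PySem.Dict.empty := by
      rw [List.foldl_map]
    rw [hfold,
        PySem.Dict.getD_foldl_modify_append, PySem.Dict.getD_empty, List.nil_append,
        List.filter_map, List.map_map]
    have hpred : ((fun p => p.1 == w) ∘ fun d => (PySem.Int.floordiv (d - 1) 7, d)) =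
        (fun d => PySem.Int.floordiv (d - 1) 7 == w) := rfl
    have hsnd : ((fun (p : Int × Int) => p.2) ∘ fun d => (PySem.Int.floordiv (d - 1) 7, d)) =
        id := rfl
    rw [hpred, hsnd, List.map_id,
        filter_week w T.toNat 1 (T + 1) (by omega),
        show max 1 (w * 7 + 1) = w * 7 + 1 by omega,
        show min (T + 1) (w * 7 + 8) = min T ((w + 1) * 7) + 1 by omega]
    rfl

-- ===== VERDICT (by name: the statement is the Claim_ definition above) =====
theorem build_weeks_spec : Claim_equal_build_weeks := by
  intro T _
  unfold Spec_build_weeks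
  rw [build_weeks_closed, build_weeks_alt_closed]
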